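-- pv_equiv track=rewrite | github.com/chingsley/6314_ml_project_sample_collection | EnergySmells_Verified/ExtraUsageOfArrays/augmented/remove_zero_pairs/smelly_remove_zero_pairs.py | remove_zero_pairs
-- ===== SOURCE A (Python) =====
-- def remove_zero_pairs(arr):
--     """Removes consecutive zero-pairs using an inefficient list modification approach."""
--     i = 0
--     while i < len(arr) - 1:
--         if arr[i] == 0 and arr[i + 1] == 0:
--             del arr[i]
--             del arr[i]  # Double deletion is costly
--             i = max(0, i - 1)
--         else:
--             i += 1
--     return arr
-- ===== SOURCE B (Python) =====
-- def remove_zero_pairs(arr):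
--     """Single-pass stack: push elements, cancel when top and current are both zero.
--     (Returns a new list; A mutates its argument in place -- equivalence is on the return value.)"""
--     stack = []
--     for x in arr:
--         if stack and stack[-1] == 0 and x == 0:
--             stack.pop()
--         else:
--             stack.append(x)
--     return stack
-- ===== Notes on version B (the rewrite author's own statement) =====
-- stated objective: faster
-- what changed: Replaced the backtracking index loop with repeated in-place double deletions by a single left-to-right pass over a stack that cancels a pushed zero against a zero on top.
import Mathlib
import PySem

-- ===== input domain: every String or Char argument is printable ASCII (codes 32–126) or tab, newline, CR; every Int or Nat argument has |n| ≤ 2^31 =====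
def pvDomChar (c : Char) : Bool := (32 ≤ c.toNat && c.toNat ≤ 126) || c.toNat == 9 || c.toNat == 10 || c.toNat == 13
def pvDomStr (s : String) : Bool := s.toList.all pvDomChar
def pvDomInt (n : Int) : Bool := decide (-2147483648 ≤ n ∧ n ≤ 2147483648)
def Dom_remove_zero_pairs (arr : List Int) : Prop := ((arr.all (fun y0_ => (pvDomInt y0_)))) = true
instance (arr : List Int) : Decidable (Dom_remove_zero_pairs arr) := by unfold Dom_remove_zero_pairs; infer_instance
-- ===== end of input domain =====

-- B replaces A's quadratic backtracking delete-in-place loop by a linear stack pass;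
-- A mutates its argument in place, so the equivalence proved here is about the return value only.

-- ===== PORT A =====
-- while i < len(arr) - 1: check arr[i], arr[i+1]; on a zero pair delete both and back up, else i += 1.
-- Indices are always in range when read, so List.getD is exact; del arr[i] is List.eraseIdx i;
-- max(0, i - 1) is Nat subtraction i - 1. The loop is run on a fuel of 2*len(arr) steps, which
-- provably suffices (each iteration strictly decreases 2*len(arr) - i); fuel only makes the same
-- computation total.
def pvLoopA (fuel : Nat) (arr : List Int) (i : Nat) : List Int :=
  match fuel with
  | 0 => arr
  | fuel + 1 =>
    if i + 1 < arr.length then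
      if arr.getD i 0 = 0 ∧ arr.getD (i + 1) 0 = 0 then
        pvLoopA fuel ((arr.eraseIdx i).eraseIdx i) (i - 1)
      else
        pvLoopA fuel arr (i + 1)
    else
      arr

def remove_zero_pairs (arr : List Int) : List Int := pvLoopA (2 * arr.length) arr 0

-- ===== PORT B =====
-- The Python stack is kept top-first: append ↔ cons, stack[-1] ↔ head?, pop ↔ tail;
-- the returned list is read off by a final reverse.
def pvRunB (stack : List Int) (l : List Int) : List Int :=
  match l with
  | [] => stack.reverse
  | x :: xs =>
    if stack.head? = some 0 ∧ x = 0 then pvRunB stack.tail xs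
    else pvRunB (x :: stack) xs

def remove_zero_pairs_alt (arr : List Int) : List Int := pvRunB [] arr

-- ===== PRECONDITION & SPEC =====
def Spec_remove_zero_pairs (arr : List Int) (out : List Int) : Prop := out = remove_zero_pairs_alt arr
instance (arr : List Int) (out : List Int) : Decidable (Spec_remove_zero_pairs arr out) := by unfold Spec_remove_zero_pairs; infer_instance

-- ===== CLAIM (what is proved, stated in full; the proofs are below) =====
def Claim_equal_remove_zero_pairs : Prop := ∀ (arr : List Int), Dom_remove_zero_pairs arr → Spec_remove_zero_pairs arr (remove_zero_pairs arr)

-- ===== LEMMAS AND PROOFS =====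

-- "no adjacent zero pair" invariant
def NoZZ : List Int → Prop
  | x :: y :: t => ¬(x = 0 ∧ y = 0) ∧ NoZZ (y :: t)
  | _ => True

theorem nozz_tail {a : Int} {l : List Int} (h : NoZZ (a :: l)) : NoZZ l := by
  cases l with
  | nil => trivial
  | cons b t => exact h.2

theorem nozz_take1 (l : List Int) : NoZZ (l.take 1) := by
  cases l <;> simp [NoZZ]

theorem getD_at_len : ∀ (p : List Int) (x : Int) (xs : List Int),
    (p ++ x :: xs).getD p.length 0 = x := by
  intro p x xs
  induction p with
  | nil => simp
  | cons a t ih => simpa using ih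

theorem erase_at_len : ∀ (p : List Int) (x : Int) (xs : List Int),
    (p ++ x :: xs).eraseIdx p.length = p ++ xs := by
  intro p x xs
  induction p with
  | nil => simp
  | cons a t ih => simpa [List.eraseIdx] using ih

-- main invariant lemma: with the reduced prefix held as the (top-first) stack s and the
-- unscanned suffix rest, A's loop from i = |s| (with enough fuel) computes exactly B's stack run.
theorem pvKey : ∀ (n : Nat) (s rest : List Int),
    2 * rest.length + s.length ≤ n → NoZZ (rest.take 1 ++ s) →
    pvLoopA n (s.reverse ++ rest) s.length = pvRunB s rest := by
  intro n
  induction n with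
  | zero =>
    intro s rest hm hred
    have : rest = [] := by
      cases rest with
      | nil => rfl
      | cons a t => simp only [List.length_cons] at hm; omega
    subst this
    simp [pvLoopA, pvRunB]
  | succ n IH =>
    intro s rest hm hred
    match rest with
    | [] =>
      rw [List.append_nil]
      simp only [pvLoopA]
      rw [if_neg (by simp only [List.length_reverse]; omega)]
      simp [pvRunB]
    | [x] =>
      simp only [pvLoopA]
      rw [if_neg (by simp only [List.length_append, List.length_reverse, List.length_cons, List.length_nil]; omega)]
      cases s with
      | nil => simp [pvRunB]
      | cons h t =>
        have hx : ¬(x = 0 ∧ h = 0) := hred.1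
        simp [pvRunB]
        intro h0 x0
        exact absurd ⟨x0, h0⟩ hx
    | x :: y :: rest' =>
      have hxs : NoZZ (x :: s) := by simpa using hred
      simp only [pvLoopA]
      rw [if_pos (by simp only [List.length_append, List.length_reverse, List.length_cons]; omega)]
      have hg1 : (s.reverse ++ x :: y :: rest').getD s.length 0 = x := by
        simpa using getD_at_len s.reverse x (y :: rest')
      have hg2 : (s.reverse ++ x :: y :: rest').getD (s.length + 1) 0 = y := by
        have := getD_at_len (s.reverse ++ [x]) y rest'
        simpa [List.append_assoc] using this
      rw [hg1, hg2]
      by_cases hzz : x = 0 ∧ y = 0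
      · rw [if_pos hzz]
        obtain ⟨hx0, hy0⟩ := hzz
        have he : ((s.reverse ++ x :: y :: rest').eraseIdx s.length).eraseIdx s.length
            = s.reverse ++ rest' := by
          have e1 := erase_at_len s.reverse x (y :: rest')
          have e2 := erase_at_len s.reverse y rest'
          simp at e1 e2
          rw [e1, e2]
        rw [he]
        cases s with
        | nil =>
          have : pvLoopA n rest' 0 = pvRunB [] rest' := by
            have := IH [] rest'
              (by simp only [List.length_cons, List.length_nil] at hm ⊢; omega)
              (by simpa using nozz_take1 rest')
            simpa using this
          simp only [List.reverse_nil, List.nil_append, List.length_nil, Nat.zero_sub]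
          rw [this]
          simp [pvRunB, hx0, hy0]
        | cons z s' =>
          have hz : z ≠ 0 := by
            intro hz0
            exact hxs.1 ⟨hx0, hz0⟩
          have harr : (z :: s').reverse ++ rest' = s'.reverse ++ z :: rest' := by
            simp
          have hlen : (z :: s' : List Int).length - 1 = s'.length := by simp
          rw [harr, hlen]
          have := IH s' (z :: rest')
            (by simp only [List.length_cons] at hm ⊢; omega)
            (by simpa using nozz_tail hxs)
          rw [this]
          simp [pvRunB, hx0, hy0, hz]
      · rw [if_neg hzz]
        have harr : s.reverse ++ x :: y :: rest' = (x :: s).reverse ++ y :: rest' := by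
          simp
        have hlen : s.length + 1 = (x :: s : List Int).length := by simp
        rw [harr, hlen]
        have := IH (x :: s) (y :: rest')
          (by simp only [List.length_cons] at hm ⊢; omega)
          (by
            refine And.intro ?_ hxs
            intro ⟨hy0, hx0⟩
            exact hzz ⟨hx0, hy0⟩)
        rw [this]
        cases s with
        | nil => simp [pvRunB]
        | cons h t =>
          have hx : ¬(x = 0 ∧ h = 0) := hxs.1
          simp [pvRunB]
          intro h0 x0
          exact absurd ⟨x0, h0⟩ hx

-- ===== VERDICT (by name: the statement is the Claim_ definition above) =====
theorem remove_zero_pairs_spec : Claim_equal_remove_zero_pairs := by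
  intro arr _
  unfold Spec_remove_zero_pairs remove_zero_pairs remove_zero_pairs_alt
  have := pvKey (2 * arr.length) [] arr (by simp) (by simpa using nozz_take1 arr)
  simpa using this
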